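-- pv_equiv track=rewrite | github.com/C3EQUALZz/DSTU_VKB | machine_learning/first_semester/second_laboratory/second_question.py | ladder
-- ===== SOURCE A (Python) =====
-- def ladder(number: int) -> str:
--     result: list[str] = []
--
--     for row in range(1, number + 1):
--         buffer = ""
--         for current_number in range(1, row + 1):
--             buffer += str(current_number)
--
--         if buffer:
--             result.append(buffer)
--
--     return "\n".join(result)
-- ===== SOURCE B (Python) =====
-- def ladder(number: int) -> str:
--     result = []
--     buffer = ""
--     for row in range(1, number + 1):
--         buffer += str(row)
--         result.append(buffer)
--     return "\n".join(result)
-- ===== Notes on version B (the rewrite author's own statement) =====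
-- stated objective: faster
-- what changed: B keeps one running prefix string extended by str(row) each iteration instead of rebuilding every line with a nested inner loop, turning the quadratic number of str() calls into one per row.
import Mathlib
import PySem

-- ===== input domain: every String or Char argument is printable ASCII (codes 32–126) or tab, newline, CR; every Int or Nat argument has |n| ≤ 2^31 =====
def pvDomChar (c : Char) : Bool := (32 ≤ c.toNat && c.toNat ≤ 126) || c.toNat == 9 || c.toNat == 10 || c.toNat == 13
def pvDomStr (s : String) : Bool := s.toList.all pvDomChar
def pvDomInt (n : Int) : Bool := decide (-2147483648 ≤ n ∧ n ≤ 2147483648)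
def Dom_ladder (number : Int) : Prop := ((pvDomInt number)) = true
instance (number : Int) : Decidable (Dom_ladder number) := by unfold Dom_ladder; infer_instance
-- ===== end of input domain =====

-- B replaces A's nested inner loop (rebuilding each line from scratch) with a single
-- running prefix extended once per row; objective: faster (one str() per row).

-- ===== PORT A =====
-- string concatenation and join are ported on the List Char side (PySem.Chars), exact for str(int)
def ladder (number : Int) : String :=
  let result : List (List Char) :=
    (PySem.List.pyRange 1 (number + 1) 1).foldl (fun res row =>
      let buffer : List Char :=
        (PySem.List.pyRange 1 (row + 1) 1).foldl (fun b c => b ++ PySem.Int.toChars c) []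
      if buffer ≠ [] then res ++ [buffer] else res) []
  String.ofList (PySem.Chars.join ['\n'] result)

-- ===== PORT B =====
def ladder_alt (number : Int) : String :=
  let st : List Char × List (List Char) :=
    (PySem.List.pyRange 1 (number + 1) 1).foldl (fun st row =>
      let buf := st.1 ++ PySem.Int.toChars row
      (buf, st.2 ++ [buf])) ([], [])
  String.ofList (PySem.Chars.join ['\n'] st.2)

-- ===== PRECONDITION & SPEC =====
def Spec_ladder (number : Int) (out : String) : Prop := out = ladder_alt number
instance (number : Int) (out : String) : Decidable (Spec_ladder number out) := by unfold Spec_ladder; infer_instance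

-- ===== CLAIM (what is proved, stated in full; the proofs are below) =====
def Claim_equal_ladder : Prop := ∀ (number : Int), Dom_ladder number → Spec_ladder number (ladder number)

-- ===== LEMMAS AND PROOFS =====

-- the inner buffer of A, as a function of the row
def pvInner (r : Int) : List Char :=
  (PySem.List.pyRange 1 (r + 1) 1).foldl (fun b c => b ++ PySem.Int.toChars c) []

lemma pvInnerFold_ne_nil (l : List Int) (s : List Char) (hs : s ≠ []) :
    l.foldl (fun b c => b ++ PySem.Int.toChars c) s ≠ [] := by
  induction l generalizing s with
  | nil => exact hs
  | cons x xs ih =>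
      simp only [List.foldl_cons]
      exact ih _ (by simp [hs])

lemma pvInner_ne_nil (n : Nat) : pvInner ((n : Int) + 1) ≠ [] := by
  unfold pvInner
  rw [PySem.List.pyRange_one_cons (by omega : (1 : Int) < (n : Int) + 1 + 1)]
  simp only [List.foldl_cons, List.nil_append]
  exact pvInnerFold_ne_nil _ _ (by decide)

lemma pvInner_succ (n : Nat) :
    pvInner ((n : Int) + 1) = pvInner (n : Int) ++ PySem.Int.toChars ((n : Int) + 1) := by
  unfold pvInner
  rw [show ((n : Int) + 1 + 1) = ((n : Int) + 1) + 1 by ring,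
      PySem.List.pyRange_one_succ_right (by omega : (1 : Int) ≤ (n : Int) + 1)]
  simp

lemma pvMain (n : Nat) :
    ((PySem.List.pyRange 1 ((n : Int) + 1) 1).foldl (fun res row =>
        let buffer : List Char :=
          (PySem.List.pyRange 1 (row + 1) 1).foldl (fun b c => b ++ PySem.Int.toChars c) []
        if buffer ≠ [] then res ++ [buffer] else res) []
      = ((PySem.List.pyRange 1 ((n : Int) + 1) 1).foldl (fun st row =>
          let buf := st.1 ++ PySem.Int.toChars row
          (buf, st.2 ++ [buf])) (([], []) : List Char × List (List Char))).2)
    ∧ ((PySem.List.pyRange 1 ((n : Int) + 1) 1).foldl (fun st row =>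
          let buf := st.1 ++ PySem.Int.toChars row
          (buf, st.2 ++ [buf])) (([], []) : List Char × List (List Char))).1 = pvInner (n : Int) := by
  induction n with
  | zero =>
      rw [PySem.List.pyRange_one_eq_nil (by omega)]
      constructor
      · rfl
      · unfold pvInner
        rw [PySem.List.pyRange_one_eq_nil (by omega)]
        rfl
  | succ n ih =>
      have hsplit : PySem.List.pyRange 1 ((↑(n + 1) : Int) + 1) 1
          = PySem.List.pyRange 1 ((n : Int) + 1) 1 ++ [(n : Int) + 1] := by
        push_cast
        rw [show ((n : Int) + 1 + 1) = ((n : Int) + 1) + 1 by ring]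
        exact PySem.List.pyRange_one_succ_right (by omega)
      rw [hsplit]
      simp only [List.foldl_append, List.foldl_cons, List.foldl_nil]
      obtain ⟨ih1, ih2⟩ := ih
      rw [ih2, ← pvInner_succ n]
      refine ⟨?_, by push_cast; ring_nf⟩
      rw [show List.foldl (fun b c => b ++ PySem.Int.toChars c) []
            (PySem.List.pyRange 1 ((n : Int) + 1 + 1) 1) = pvInner ((n : Int) + 1) from rfl,
          if_pos (pvInner_ne_nil n), ih1]

-- ===== VERDICT (by name: the statement is the Claim_ definition above) =====
theorem ladder_spec : Claim_equal_ladder := by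
  intro number _
  unfold Spec_ladder ladder ladder_alt
  by_cases h : number ≤ 0
  · rw [PySem.List.pyRange_one_eq_nil (by omega)]
    rfl
  · obtain ⟨n, rfl⟩ : ∃ n : Nat, number = (n : Int) + 1 := by
      refine ⟨(number - 1).toNat, by omega⟩
    have := pvMain (n + 1)
    push_cast at this
    simp only [this.1]
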